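-- pv_equiv track=rewrite | github.com/Nethra11/eob-ocr-parser | config.py | extract_patient_name
-- ===== SOURCE A (Python) =====
-- def extract_patient_name(text):
--     lines = text.split('\n')
--     for i, line in enumerate(lines):
--         if "Member" in line:
--             for j in range(i + 1, len(lines)):
--                 candidate = lines[j].strip()
--                 if candidate and not candidate.lower().startswith("january"):
--                     return candidate
--     return "Not Found"
-- ===== SOURCE B (Python) =====
-- def extract_patient_name(text):
--     armed = False
--     for line in text.split('\n'):
--         if armed:
--             candidate = line.strip()
--             if candidate and not candidate.lower().startswith("january"):
--                 return candidate
--         if "Member" in line: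
--             armed = True
--     return "Not Found"
-- ===== Notes on version B (the rewrite author's own statement) =====
-- stated objective: simpler
-- what changed: Replaced the nested enumerate/range rescan (find each marker line, then re-scan all following lines by index) with a single pass over the split lines carrying a boolean flag, checking candidates before setting the flag so a marker line is never its own candidate.
import Mathlib
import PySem

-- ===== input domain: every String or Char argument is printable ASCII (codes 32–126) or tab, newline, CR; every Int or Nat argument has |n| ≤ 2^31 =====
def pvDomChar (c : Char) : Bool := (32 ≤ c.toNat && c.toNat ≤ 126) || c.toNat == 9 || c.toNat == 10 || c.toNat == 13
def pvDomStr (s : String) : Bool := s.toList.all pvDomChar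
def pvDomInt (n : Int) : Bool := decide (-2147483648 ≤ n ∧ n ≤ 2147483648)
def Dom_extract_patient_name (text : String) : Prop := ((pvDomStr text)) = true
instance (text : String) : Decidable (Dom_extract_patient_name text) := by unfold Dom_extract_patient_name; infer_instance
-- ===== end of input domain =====

-- B replaces A's nested find-marker/rescan-by-index loops with one pass carrying a boolean flag (simpler).

-- ===== PORT A =====
-- inner loop: for j in range(i+1, len(lines)): candidate = lines[j].strip(); if …: return candidate
def pvA_scan (lines : List String) (j : Nat) : Option String :=
  if h : j < lines.length then
    let candidate := PySem.Str.strip lines[j]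
    if candidate ≠ "" ∧ PySem.Str.startswith (PySem.Str.lower candidate) "january" = false then
      some candidate
    else pvA_scan lines (j + 1)
  else none
termination_by lines.length - j

-- outer loop: for i, line in enumerate(lines): if "Member" in line: <inner loop>
def pvA_outer (lines : List String) (i : Nat) : Option String :=
  if h : i < lines.length then
    if PySem.Str.isIn "Member" lines[i] then
      match pvA_scan lines (i + 1) with
      | some c => some c
      | none => pvA_outer lines (i + 1)
    else pvA_outer lines (i + 1)
  else none
termination_by lines.length - i

def extract_patient_name (text : String) : String :=
  (pvA_outer ((PySem.Str.split? text "\n").getD []) 0).getD "Not Found"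

-- ===== PORT B =====
def pvB_loop (lines : List String) (armed : Bool) : Option String :=
  match lines with
  | [] => none
  | line :: rest =>
    if armed then
      let candidate := PySem.Str.strip line
      if candidate ≠ "" ∧ PySem.Str.startswith (PySem.Str.lower candidate) "january" = false then
        some candidate
      else pvB_loop rest (armed || PySem.Str.isIn "Member" line)
    else pvB_loop rest (armed || PySem.Str.isIn "Member" line)

def extract_patient_name_alt (text : String) : String :=
  (pvB_loop ((PySem.Str.split? text "\n").getD []) false).getD "Not Found"

-- ===== PRECONDITION & SPEC =====
def Spec_extract_patient_name (text : String) (out : String) : Prop := out = extract_patient_name_alt text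
instance (text : String) (out : String) : Decidable (Spec_extract_patient_name text out) := by unfold Spec_extract_patient_name; infer_instance

-- ===== CLAIM (what is proved, stated in full; the proofs are below) =====
def Claim_equal_extract_patient_name : Prop := ∀ (text : String), Dom_extract_patient_name text → Spec_extract_patient_name text (extract_patient_name text)

-- ===== LEMMAS AND PROOFS =====

-- the first acceptable candidate produced by a line, if any
def pvGood (line : String) : Option String :=
  let c := PySem.Str.strip line
  if c ≠ "" ∧ PySem.Str.startswith (PySem.Str.lower c) "january" = false then some c else none

-- abstract form of A: at the first marker line, return the first candidate strictly after it
def pvAux : List String → Option String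
  | [] => none
  | l :: rest =>
    if PySem.Str.isIn "Member" l then (rest.findSome? pvGood).orElse (fun _ => pvAux rest)
    else pvAux rest

theorem pvGood_pos (l : String)
    (hc : PySem.Str.strip l ≠ "" ∧ PySem.Str.startswith (PySem.Str.lower (PySem.Str.strip l)) "january" = false) :
    pvGood l = some (PySem.Str.strip l) := by
  simp only [pvGood, if_pos hc]

theorem pvGood_neg (l : String)
    (hc : ¬(PySem.Str.strip l ≠ "" ∧ PySem.Str.startswith (PySem.Str.lower (PySem.Str.strip l)) "january" = false)) :
    pvGood l = none := by
  simp only [pvGood, if_neg hc]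

theorem pv_scan_eq (lines : List String) (j : Nat) :
    pvA_scan lines j = (lines.drop j).findSome? pvGood := by
  rw [pvA_scan]
  by_cases h : j < lines.length
  · rw [dif_pos h, List.drop_eq_getElem_cons h, List.findSome?_cons]
    have ih := pv_scan_eq lines (j + 1)
    by_cases hc : PySem.Str.strip lines[j] ≠ "" ∧
        PySem.Str.startswith (PySem.Str.lower (PySem.Str.strip lines[j])) "january" = false
    · rw [pvGood_pos _ hc]; simp only [if_pos hc]
    · rw [pvGood_neg _ hc]; simp only [if_neg hc]; exact ih
  · rw [dif_neg h, List.drop_eq_nil_of_le (by omega), List.findSome?_nil]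
termination_by lines.length - j

theorem pvAux_none (lines : List String) (h : lines.findSome? pvGood = none) :
    pvAux lines = none := by
  induction lines with
  | nil => rfl
  | cons l rest ih =>
    rw [List.findSome?_cons] at h
    cases hg : pvGood l with
    | some c => rw [hg] at h; exact absurd h (by simp)
    | none =>
      rw [hg] at h
      have h2 : List.findSome? pvGood rest = none := h
      rw [pvAux]
      split_ifs
      · simp [h2, ih h2, Option.orElse]
      · exact ih h2

theorem pv_outer_eq (lines : List String) (i : Nat) :
    pvA_outer lines i = pvAux (lines.drop i) := by
  rw [pvA_outer]
  by_cases h : i < lines.length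
  · rw [dif_pos h, List.drop_eq_getElem_cons h, pvAux, pv_scan_eq]
    have ih := pv_outer_eq lines (i + 1)
    split_ifs with hm
    · cases hf : (lines.drop (i + 1)).findSome? pvGood with
      | some c => simp [Option.orElse]
      | none => simp [Option.orElse, ih, pvAux_none _ hf]
    · exact ih
  · rw [dif_neg h, List.drop_eq_nil_of_le (by omega)]; rfl
termination_by lines.length - i

theorem pvB_true (lines : List String) : pvB_loop lines true = lines.findSome? pvGood := by
  induction lines with
  | nil => rfl
  | cons l rest ih =>
    rw [pvB_loop, List.findSome?_cons]
    simp only [reduceIte]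
    by_cases hc : PySem.Str.strip l ≠ "" ∧
        PySem.Str.startswith (PySem.Str.lower (PySem.Str.strip l)) "january" = false
    · rw [pvGood_pos _ hc, if_pos hc]
    · rw [pvGood_neg _ hc, if_neg hc, Bool.true_or]
      exact ih

theorem pvB_false (lines : List String) : pvB_loop lines false = pvAux lines := by
  induction lines with
  | nil => rfl
  | cons l rest ih =>
    rw [pvB_loop, pvAux]
    simp only [Bool.false_or, if_neg Bool.false_ne_true]
    by_cases hm : PySem.Str.isIn "Member" l = true
    · rw [hm, if_pos rfl, pvB_true]
      cases hf : rest.findSome? pvGood with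
      | some c => simp [Option.orElse]
      | none => simp [Option.orElse, pvAux_none _ hf]
    · rw [Bool.not_eq_true] at hm
      rw [hm, if_neg (by simp)]
      exact ih

-- ===== VERDICT (by name: the statement is the Claim_ definition above) =====
theorem extract_patient_name_spec : Claim_equal_extract_patient_name := by
  intro text _
  unfold Spec_extract_patient_name extract_patient_name extract_patient_name_alt
  rw [pv_outer_eq, List.drop_zero, pvB_false]
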